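-- pv_equiv track=rewrite | github.com/legofanclub/advent-of-code-2024 | day_15/q2.py | get_all_pushes_above
-- ===== SOURCE A (Python) =====
-- def get_all_pushes_above(i, j, warehouse, seen):
--     """returns the set of all box parts that will be pushed upwards by pushing the initial box part up"""
--     if (i, j) in seen:
--         return set()
--     else:
--         seen.add((i, j))
--
--     apu = set([(i, j)])
--     if warehouse[i][j] == "[":
--         return (
--             apu
--             | get_all_pushes_above(i, j + 1, warehouse, seen)
--             | get_all_pushes_above(i - 1, j, warehouse, seen)
--         )
--     elif warehouse[i][j] == "]":
--         return (
--             apu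
--             | get_all_pushes_above(i, j - 1, warehouse, seen)
--             | get_all_pushes_above(i - 1, j, warehouse, seen)
--         )
--     else:
--         return set()
-- ===== SOURCE B (Python) =====
-- def get_all_pushes_above(i, j, warehouse, seen):
--     """returns the set of all box parts that will be pushed upwards by pushing the initial box part up"""
--     result = set()
--     stack = [(i, j)]
--     while stack:
--         a, b = stack.pop()
--         if (a, b) in seen:
--             continue
--         seen.add((a, b))
--         c = warehouse[a][b]
--         if c == "[":
--             result.add((a, b))
--             stack.append((a - 1, b))
--             stack.append((a, b + 1))
--         elif c == "]":
--             result.add((a, b))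
--             stack.append((a - 1, b))
--             stack.append((a, b - 1))
--     return result
-- ===== Notes on version B (the rewrite author's own statement) =====
-- stated objective: alternative
-- what changed: Replaces A's recursive DFS (set unions of recursive calls sharing a mutated seen set) by an iterative DFS with an explicit stack and a single accumulated result set.
import Mathlib
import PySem

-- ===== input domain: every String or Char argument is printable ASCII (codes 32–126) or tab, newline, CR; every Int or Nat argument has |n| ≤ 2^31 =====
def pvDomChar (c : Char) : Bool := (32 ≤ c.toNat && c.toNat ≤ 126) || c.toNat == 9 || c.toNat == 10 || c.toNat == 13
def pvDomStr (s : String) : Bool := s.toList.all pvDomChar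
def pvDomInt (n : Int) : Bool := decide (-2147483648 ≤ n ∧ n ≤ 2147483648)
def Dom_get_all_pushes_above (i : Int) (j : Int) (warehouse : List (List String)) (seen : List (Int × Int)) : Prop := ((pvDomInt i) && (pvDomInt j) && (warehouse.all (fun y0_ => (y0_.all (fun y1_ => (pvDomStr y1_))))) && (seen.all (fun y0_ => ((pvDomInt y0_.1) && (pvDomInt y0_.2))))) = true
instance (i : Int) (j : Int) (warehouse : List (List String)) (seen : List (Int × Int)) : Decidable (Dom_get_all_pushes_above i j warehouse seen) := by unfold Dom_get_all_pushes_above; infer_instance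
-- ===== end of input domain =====

-- B replaces A's recursion (and its mutation of the shared `seen` set) by an explicit-stack
-- iterative DFS with an accumulated result set; same visiting rule, no recursion.  Objective:
-- alternative decomposition.  Both A and B mutate the caller's `seen` set identically; the
-- equivalence proved here is about the RETURN value (both ports thread `seen` explicitly).

-- ===== PORT A =====
-- warehouse[a][b] as Python computes it (negative indices wrap; none = IndexError)
def pvCell (w : List (List String)) (a b : Int) : Option String :=
  match PySem.List.pyGet? w a with
  | some row => PySem.List.pyGet? row b
  | none => none

-- fuel bounding the recursion depth of A; on inputs admitted by Pre_ the depth never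
-- exceeds it (each recursive frame adds a fresh in-grid position to `seen`)
def pvFuelA (w : List (List String)) : Nat := (w.map List.length).sum + 1

-- A's recursion, with Python's shared mutable `seen` threaded explicitly:
-- returns (result set, seen after the call)
def pvGoA (w : List (List String)) : Nat → Int → Int → PySem.Set (Int × Int) → PySem.Set (Int × Int) × PySem.Set (Int × Int)
  | 0, _, _, seen => (PySem.Set.empty, seen)     -- fuel exhaustion: unreachable under Pre_
  | f+1, i, j, seen =>
    if (i, j) ∈ seen then (PySem.Set.empty, seen)
    else
      let seen1 := PySem.Set.add seen (i, j)
      if pvCell w i j = some "[" then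
        let r1 := pvGoA w f i (j+1) seen1
        let r2 := pvGoA w f (i-1) j r1.2
        (PySem.Set.union (PySem.Set.union (PySem.Set.ofList [(i, j)]) r1.1) r2.1, r2.2)
      else if pvCell w i j = some "]" then
        let r1 := pvGoA w f i (j-1) seen1
        let r2 := pvGoA w f (i-1) j r1.2
        (PySem.Set.union (PySem.Set.union (PySem.Set.ofList [(i, j)]) r1.1) r2.1, r2.2)
      else (PySem.Set.empty, seen1)

def get_all_pushes_above (i : Int) (j : Int) (warehouse : List (List String)) (seen : List (Int × Int)) : List (Int × Int) :=
  (pvGoA warehouse (pvFuelA warehouse) i j (PySem.Set.ofList seen)).1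

-- ===== PORT B =====
-- fuel bounding the number of loop iterations of B (each pop either drops a stack entry
-- or marks a fresh in-grid position seen and pushes at most two entries)
def pvFuelB (w : List (List String)) : Nat := 3 * (w.map List.length).sum + 2

-- B's while-loop; the head of the list is the top of the Python stack (list.pop/append),
-- `seen` threaded explicitly as in port A; returns (result set, seen after the loop)
def pvLoopB (w : List (List String)) : Nat → List (Int × Int) → PySem.Set (Int × Int) → PySem.Set (Int × Int) → PySem.Set (Int × Int) × PySem.Set (Int × Int)
  | 0, _, seen, res => (res, seen)               -- fuel exhaustion: unreachable under Pre_
  | _+1, [], seen, res => (res, seen)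
  | f+1, (a, b) :: st, seen, res =>
    if (a, b) ∈ seen then pvLoopB w f st seen res
    else
      let seen1 := PySem.Set.add seen (a, b)
      if pvCell w a b = some "[" then
        pvLoopB w f ((a, b+1) :: (a-1, b) :: st) seen1 (PySem.Set.add res (a, b))
      else if pvCell w a b = some "]" then
        pvLoopB w f ((a, b-1) :: (a-1, b) :: st) seen1 (PySem.Set.add res (a, b))
      else pvLoopB w f st seen1 res

def get_all_pushes_above_alt (i : Int) (j : Int) (warehouse : List (List String)) (seen : List (Int × Int)) : List (Int × Int) :=
  (pvLoopB warehouse (pvFuelB warehouse) [(i, j)] (PySem.Set.ofList seen) PySem.Set.empty).1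

-- ===== PRECONDITION & SPEC =====
def pvIsBox (s : String) : Bool := s == "[" || s == "]"

-- grid shape under which A's recursive walk can never index out of range: rectangular,
-- and no box characters in the first row, first column or last column
def pvSafe (w : List (List String)) : Bool :=
  !w.isEmpty &&
  w.all (fun row => row.length == (w.headD []).length) &&
  (w.headD []).all (fun s => !pvIsBox s) &&
  w.all (fun row => !pvIsBox (row.headD "") && !pvIsBox (row.getLastD ""))

-- Pre_ excludes inputs on which A's recursive walk may raise IndexError; being a closed-form
-- sufficient safety condition (box-free grid borders) it is narrower than exact
-- error-freedom, so it also excludes some box configurations on which A happens to return.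
def Pre_get_all_pushes_above (i : Int) (j : Int) (warehouse : List (List String)) (seen : List (Int × Int)) : Prop :=
  (i, j) ∈ seen
  ∨ (pvCell warehouse i j).map pvIsBox = some false
  ∨ (pvSafe warehouse = true ∧ 0 ≤ i ∧ i < warehouse.length ∧ 0 ≤ j ∧ j < (warehouse.headD []).length)

instance (i : Int) (j : Int) (warehouse : List (List String)) (seen : List (Int × Int)) : Decidable (Pre_get_all_pushes_above i j warehouse seen) := by unfold Pre_get_all_pushes_above; infer_instance

def pvWitness_get_all_pushes_above : Int × Int × List (List String) × (List (Int × Int)) :=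
  (1, 1, [["#", "#", "#", "#"], ["#", "[", "]", "#"]], [])

def Spec_get_all_pushes_above (i : Int) (j : Int) (warehouse : List (List String)) (seen : List (Int × Int)) (out : List (Int × Int)) : Prop := out = get_all_pushes_above_alt i j warehouse seen
instance (i : Int) (j : Int) (warehouse : List (List String)) (seen : List (Int × Int)) (out : List (Int × Int)) : Decidable (Spec_get_all_pushes_above i j warehouse seen out) := by unfold Spec_get_all_pushes_above; infer_instance

-- ===== CLAIM (what is proved, stated in full; the proofs are below) =====
def Claim_equal_get_all_pushes_above : Prop := ∀ (i : Int) (j : Int) (warehouse : List (List String)) (seen : List (Int × Int)), Dom_get_all_pushes_above i j warehouse seen → Pre_get_all_pushes_above i j warehouse seen → Spec_get_all_pushes_above i j warehouse seen (get_all_pushes_above i j warehouse seen)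

-- ===== LEMMAS AND PROOFS =====

-- in-grid positions (under pvSafe every access A or B performs happens at one of these)
def pvInR (w : List (List String)) (a b : Int) : Prop :=
  0 ≤ a ∧ a < w.length ∧ 0 ≤ b ∧ b < (w.headD []).length

-- the in-grid positions as a list, and the measure "in-grid positions not yet seen"
def pvReg (w : List (List String)) : List (Int × Int) :=
  (List.range w.length).flatMap (fun a => (List.range (w.headD []).length).map (fun b => ((a : Int), (b : Int))))

def pvM (w : List (List String)) (seen : PySem.Set (Int × Int)) : Nat :=
  ((pvReg w).filter (fun p => !(decide (p ∈ seen)))).length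






lemma pvGetLastD_eq (l : List String) (h : l ≠ []) :
    l.getLastD "" = l[l.length-1]'(by cases l with | nil => exact absurd rfl h | cons x t => simp only [List.length_cons]; omega) := by
  have hlen : 0 < l.length := by cases l with | nil => exact absurd rfl h | cons x t => simp
  rw [List.getLastD_eq_getLast?, List.getLast?_eq_getElem?, List.getElem?_eq_getElem (by omega)]
  simp

lemma pvHeadD_eq (l : List String) (h : l ≠ []) :
    l.headD "" = l[0]'(by cases l with | nil => exact absurd rfl h | cons x t => simp only [List.length_cons]; omega) := by
  cases l
  · simp at h
  · simp

lemma pvRow_spec (w : List (List String)) (a : Int) (h1 : 0 ≤ a) (h2 : a < w.length) :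
    PySem.List.pyGet? w a = some (w[a.toNat]'(by omega)) := by
  rw [PySem.List.pyGet?_eq_some_getElem w h1 (by simpa using h2)]

lemma pvCell_spec (w : List (List String)) (a b : Int)
    (hrect : ∀ row ∈ w, row.length = (w.headD []).length) (h : pvInR w a b) :
    ∃ (ha : a.toNat < w.length) (hb : b.toNat < (w[a.toNat]'ha).length),
      pvCell w a b = some ((w[a.toNat]'ha)[b.toNat]'hb) := by
  obtain ⟨h1, h2, h3, h4⟩ := h
  have ha : a.toNat < w.length := by omega
  have hlen : (w[a.toNat]'ha).length = (w.headD []).length :=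
    hrect _ (List.getElem_mem ha)
  have hb : b.toNat < (w[a.toNat]'ha).length := by omega
  refine ⟨ha, hb, ?_⟩
  have hrow := pvRow_spec w a h1 h2
  simp only [pvCell, hrow]
  exact PySem.List.pyGet?_eq_some_getElem _ h3 (by omega)

lemma pvSafe_rect (w : List (List String)) (hs : pvSafe w = true) :
    ∀ row ∈ w, row.length = (w.headD []).length := by
  simp only [pvSafe, Bool.and_eq_true, List.all_eq_true, beq_iff_eq] at hs
  exact hs.1.1.2

lemma pvBox_inside (w : List (List String)) (a b : Int) (s : String) (hs : pvSafe w = true)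
    (h : pvInR w a b) (hc : pvCell w a b = some s) (hb : pvIsBox s = true) :
    pvInR w (a-1) b ∧ pvInR w a (b+1) ∧ pvInR w a (b-1) := by
  have hrect := pvSafe_rect w hs
  obtain ⟨ha', hb', hc'⟩ := pvCell_spec w a b hrect h
  rw [hc] at hc'
  obtain rfl : s = (w[a.toNat]'ha')[b.toNat]'hb' := by injection hc'
  obtain ⟨h1, h2, h3, h4⟩ := h
  simp only [pvSafe, Bool.and_eq_true, List.all_eq_true, beq_iff_eq, Bool.not_eq_true',
    List.isEmpty_eq_false_iff] at hs
  obtain ⟨⟨⟨hne, _⟩, hrow0⟩, hcols⟩ := hs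
  have rowmem := List.getElem_mem ha'
  obtain ⟨hB1, hB2⟩ := hcols _ rowmem
  have hrlen : (w[a.toNat]'ha').length = (w.headD []).length := hrect _ rowmem
  have hrowne : (w[a.toNat]'ha') ≠ [] := by
    intro hnil
    have : (w.headD []).length = 0 := by rw [← hrlen, hnil]; rfl
    omega
  -- the first row contains no box, so a ≥ 1
  have hA : 1 ≤ a := by
    by_contra hcon
    have ha0 : a.toNat = 0 := by omega
    have hrow_eq : w[a.toNat]'ha' = w.headD [] := by
      cases w with
      | nil => exact absurd rfl hne
      | cons r t => simp [ha0]
    have := hrow0 _ (by rw [← hrow_eq]; exact List.getElem_mem hb')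
    simp [hb] at this
  -- the first cell of a row is no box, so b ≥ 1
  have hBlo : 1 ≤ b := by
    by_contra hcon
    have hb0 : b.toNat = 0 := by omega
    rw [pvHeadD_eq _ hrowne] at hB1
    rw [show ((w[a.toNat]'ha')[b.toNat]'hb') = ((w[a.toNat]'ha')[0]'(by omega)) by simp [hb0]] at hb
    rw [hB1] at hb
    exact absurd hb (by simp)
  -- the last cell of a row is no box, so b + 1 < C
  have hBhi : b + 1 < ((w.headD []).length : Int) := by
    by_contra hcon
    have hbl : b.toNat = (w[a.toNat]'ha').length - 1 := by omega
    rw [pvGetLastD_eq _ hrowne] at hB2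
    rw [show ((w[a.toNat]'ha')[b.toNat]'hb') = ((w[a.toNat]'ha')[(w[a.toNat]'ha').length - 1]'(by omega)) by simp [hbl]] at hb
    rw [hB2] at hb
    exact absurd hb (by simp)
  refine ⟨⟨by omega, by omega, by omega, by omega⟩,
          ⟨by omega, by omega, by omega, by omega⟩,
          ⟨by omega, by omega, by omega, by omega⟩⟩

theorem pvCountP_strict {α : Type} (l : List α) (p q : α → Bool) (h : ∀ x ∈ l, q x → p x)
    (x : α) (hx : x ∈ l) (hp : p x) (hq : ¬ q x) :
    l.countP q < l.countP p := by
  induction l with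
  | nil => simp at hx
  | cons a t ih =>
    simp only [List.countP_cons]
    cases hx with
    | head =>
      have hle : t.countP q ≤ t.countP p := List.countP_mono_left (fun y hy => h y (.tail _ hy))
      simp [hq, hp]; omega
    | tail _ hx =>
      have := ih (fun y hy => h y (.tail _ hy)) hx
      by_cases hqa : q a
      · simp [hqa, h a (.head _) hqa]; omega
      · simp [hqa]; omega

lemma pvM_mono (w : List (List String)) (s t : PySem.Set (Int × Int)) (h : ∀ p, p ∈ s → p ∈ t) :
    pvM w t ≤ pvM w s := by
  simp only [pvM, ← List.countP_eq_length_filter]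
  refine List.countP_mono_left (fun x _ hx => ?_)
  simp only [Bool.not_eq_true', decide_eq_false_iff_not] at hx ⊢
  exact fun hxs => hx (h x hxs)

lemma mem_pvReg (w : List (List String)) (a b : Int) (h : pvInR w a b) : (a, b) ∈ pvReg w := by
  obtain ⟨h1, h2, h3, h4⟩ := h
  rw [List.headD_eq_head?_getD] at h4
  simp only [pvReg, List.mem_flatMap]
  refine ⟨a.toNat, ?_, ?_⟩
  · simp
    exact ⟨a.toNat, by omega, by omega⟩
  · simp [List.headD_eq_head?_getD]
    exact ⟨⟨b.toNat, by omega, by omega⟩, h1⟩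

lemma pvM_add_lt (w : List (List String)) (seen : PySem.Set (Int × Int)) (a b : Int)
    (hin : pvInR w a b) (hns : (a, b) ∉ seen) :
    pvM w (PySem.Set.add seen (a, b)) < pvM w seen := by
  simp only [pvM, ← List.countP_eq_length_filter]
  refine pvCountP_strict _ _ _ (fun x _ hx => ?_) (a, b) (mem_pvReg w a b hin) (by simpa) ?_
  · simp only [Bool.not_eq_true', decide_eq_false_iff_not, PySem.Set.mem_add] at hx ⊢
    exact fun hxs => hx (Or.inl hxs)
  · simp [PySem.Set.mem_add]

lemma pvM_le_sum (w : List (List String)) (hs : pvSafe w = true) (seen : PySem.Set (Int × Int)) :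
    pvM w seen ≤ (w.map List.length).sum := by
  have hrect : ∀ row ∈ w, row.length = (w.headD []).length := by
    simp only [pvSafe, Bool.and_eq_true, List.all_eq_true, beq_iff_eq] at hs
    exact hs.1.1.2
  have h1 : pvM w seen ≤ (pvReg w).length := by
    simp only [pvM]; exact List.length_filter_le _ _
  have h2 : (pvReg w).length = w.length * (w.headD []).length := by
    simp [pvReg, List.length_flatMap]
  have h3 : (w.map List.length).sum = w.length * (w.headD []).length := by
    have : w.map List.length = w.map (fun _ => (w.headD []).length) := List.map_congr_left hrect
    rw [this, List.map_const', List.sum_replicate, smul_eq_mul]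
  omega

lemma pvGoA_facts (w : List (List String)) (f : Nat) (i j : Int) (seen : PySem.Set (Int × Int)) :
    (∀ p, p ∈ seen → p ∈ (pvGoA w f i j seen).2) ∧
    (∀ p, p ∈ (pvGoA w f i j seen).1 → p ∉ seen ∧ p ∈ (pvGoA w f i j seen).2) ∧
    (pvGoA w f i j seen).1.Nodup := by
  induction f generalizing i j seen with
  | zero => simp [pvGoA, PySem.Set.empty]
  | succ f ih =>
    by_cases hmem : (i, j) ∈ seen
    · simp [pvGoA, hmem]
    · by_cases hL : pvCell w i j = some "["
      · have e : pvGoA w (f+1) i j seen =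
          (PySem.Set.union (PySem.Set.union (PySem.Set.ofList [(i, j)])
              (pvGoA w f i (j+1) (PySem.Set.add seen (i, j))).1)
              (pvGoA w f (i-1) j (pvGoA w f i (j+1) (PySem.Set.add seen (i, j))).2).1,
           (pvGoA w f (i-1) j (pvGoA w f i (j+1) (PySem.Set.add seen (i, j))).2).2) := by
          simp [pvGoA, hmem, hL]
        obtain ⟨g1, g2, g3⟩ := ih i (j+1) (PySem.Set.add seen (i, j))
        obtain ⟨h1, h2, h3⟩ := ih (i-1) j (pvGoA w f i (j+1) (PySem.Set.add seen (i, j))).2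
        rw [e]
        refine ⟨?_, ?_, ?_⟩
        · intro p hp
          exact h1 _ (g1 _ ((PySem.Set.mem_add seen (i,j) p).mpr (Or.inl hp)))
        · intro p hp
          simp only [PySem.Set.mem_union, PySem.Set.mem_ofList, List.mem_singleton] at hp
          rcases hp with (rfl | hp) | hp
          · exact ⟨hmem, h1 _ (g1 _ ((PySem.Set.mem_add seen (i,j) (i,j)).mpr (Or.inr rfl)))⟩
          · obtain ⟨hfresh, hin⟩ := g2 _ hp
            exact ⟨fun hs => hfresh ((PySem.Set.mem_add seen (i,j) p).mpr (Or.inl hs)), h1 _ hin⟩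
          · obtain ⟨hfresh, hin⟩ := h2 _ hp
            exact ⟨fun hs => hfresh (g1 _ ((PySem.Set.mem_add seen (i,j) p).mpr (Or.inl hs))), hin⟩
        · exact PySem.Set.nodup_union _ _ (PySem.Set.nodup_union _ _ (PySem.Set.nodup_ofList _))
      · by_cases hR : pvCell w i j = some "]"
        · have e : pvGoA w (f+1) i j seen =
            (PySem.Set.union (PySem.Set.union (PySem.Set.ofList [(i, j)])
                (pvGoA w f i (j-1) (PySem.Set.add seen (i, j))).1)
                (pvGoA w f (i-1) j (pvGoA w f i (j-1) (PySem.Set.add seen (i, j))).2).1,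
             (pvGoA w f (i-1) j (pvGoA w f i (j-1) (PySem.Set.add seen (i, j))).2).2) := by
            simp [pvGoA, hmem, hR]
          obtain ⟨g1, g2, g3⟩ := ih i (j-1) (PySem.Set.add seen (i, j))
          obtain ⟨h1, h2, h3⟩ := ih (i-1) j (pvGoA w f i (j-1) (PySem.Set.add seen (i, j))).2
          rw [e]
          refine ⟨?_, ?_, ?_⟩
          · intro p hp
            exact h1 _ (g1 _ ((PySem.Set.mem_add seen (i,j) p).mpr (Or.inl hp)))
          · intro p hp
            simp only [PySem.Set.mem_union, PySem.Set.mem_ofList, List.mem_singleton] at hp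
            rcases hp with (rfl | hp) | hp
            · exact ⟨hmem, h1 _ (g1 _ ((PySem.Set.mem_add seen (i,j) (i,j)).mpr (Or.inr rfl)))⟩
            · obtain ⟨hfresh, hin⟩ := g2 _ hp
              exact ⟨fun hs => hfresh ((PySem.Set.mem_add seen (i,j) p).mpr (Or.inl hs)), h1 _ hin⟩
            · obtain ⟨hfresh, hin⟩ := h2 _ hp
              exact ⟨fun hs => hfresh (g1 _ ((PySem.Set.mem_add seen (i,j) p).mpr (Or.inl hs))), hin⟩
          · exact PySem.Set.nodup_union _ _ (PySem.Set.nodup_union _ _ (PySem.Set.nodup_ofList _))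
        · have e : pvGoA w (f+1) i j seen = (PySem.Set.empty, PySem.Set.add seen (i, j)) := by
            simp [pvGoA, hmem, hL, hR]
          rw [e]
          exact ⟨fun p hp => (PySem.Set.mem_add seen (i,j) p).mpr (Or.inl hp),
                 fun p hp => by simp [PySem.Set.empty] at hp, by simp [PySem.Set.empty]⟩

lemma pvGoA_fuel_irrel (w : List (List String)) (hs : pvSafe w = true) :
    ∀ f f' : Nat, ∀ i j : Int, ∀ seen : PySem.Set (Int × Int),
      pvInR w i j → pvM w seen < f → pvM w seen < f' →
      pvGoA w f i j seen = pvGoA w f' i j seen := by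
  intro f
  induction f with
  | zero => intro f' i j seen _ h _; omega
  | succ f ih =>
    intro f' i j seen hin hf hf'
    obtain ⟨f'', rfl⟩ : ∃ k, f' = k + 1 := ⟨f' - 1, by omega⟩
    by_cases hmem : (i, j) ∈ seen
    · simp [pvGoA, hmem]
    · have hdrop := pvM_add_lt w seen i j hin hmem
      by_cases hL : pvCell w i j = some "["
      · have hbox := pvBox_inside w i j "[" hs hin hL (by simp [pvIsBox])
        have hin1 : pvInR w i (j+1) := hbox.2.1
        have e1 : pvGoA w f i (j+1) (PySem.Set.add seen (i, j)) =
                  pvGoA w f'' i (j+1) (PySem.Set.add seen (i, j)) :=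
          ih f'' i (j+1) _ hin1 (by omega) (by omega)
        have hsub : ∀ p, p ∈ PySem.Set.add seen (i, j) →
            p ∈ (pvGoA w f'' i (j+1) (PySem.Set.add seen (i, j))).2 :=
          (pvGoA_facts w f'' i (j+1) _).1
        have hm2 : pvM w (pvGoA w f'' i (j+1) (PySem.Set.add seen (i, j))).2 ≤
            pvM w (PySem.Set.add seen (i, j)) := pvM_mono w _ _ hsub
        have e2 : pvGoA w f (i-1) j (pvGoA w f'' i (j+1) (PySem.Set.add seen (i, j))).2 =
                  pvGoA w f'' (i-1) j (pvGoA w f'' i (j+1) (PySem.Set.add seen (i, j))).2 :=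
          ih f'' (i-1) j _ hbox.1 (by omega) (by omega)
        simp only [pvGoA, hmem, hL, if_pos, ite_false]
        simp only [e1, e2]
      · by_cases hR : pvCell w i j = some "]"
        · have hbox := pvBox_inside w i j "]" hs hin hR (by simp [pvIsBox])
          have hin1 : pvInR w i (j-1) := hbox.2.2
          have e1 : pvGoA w f i (j-1) (PySem.Set.add seen (i, j)) =
                    pvGoA w f'' i (j-1) (PySem.Set.add seen (i, j)) :=
            ih f'' i (j-1) _ hin1 (by omega) (by omega)
          have hsub : ∀ p, p ∈ PySem.Set.add seen (i, j) →
              p ∈ (pvGoA w f'' i (j-1) (PySem.Set.add seen (i, j))).2 :=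
            (pvGoA_facts w f'' i (j-1) _).1
          have hm2 : pvM w (pvGoA w f'' i (j-1) (PySem.Set.add seen (i, j))).2 ≤
              pvM w (PySem.Set.add seen (i, j)) := pvM_mono w _ _ hsub
          have e2 : pvGoA w f (i-1) j (pvGoA w f'' i (j-1) (PySem.Set.add seen (i, j))).2 =
                    pvGoA w f'' (i-1) j (pvGoA w f'' i (j-1) (PySem.Set.add seen (i, j))).2 :=
            ih f'' (i-1) j _ hbox.1 (by omega) (by omega)
          simp only [PySem.Set.add_of_not_mem hmem] at e1 e2
          simp [pvGoA, hmem, hR]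
          rw [e1, e2]; exact ⟨rfl, rfl⟩
        · simp [pvGoA, hmem, hL, hR]

lemma pvUnion_shuffle (res r1 r2 : PySem.Set (Int × Int)) (x : Int × Int)
    (h1 : r1.Nodup) (h2 : r2.Nodup)
    (hx1 : ∀ p ∈ r1, p ≠ x) (hx2 : ∀ p ∈ r2, p ≠ x) (h12 : ∀ p ∈ r2, p ∉ r1) :
    PySem.Set.union res (PySem.Set.union (PySem.Set.union (PySem.Set.ofList [x]) r1) r2)
      = PySem.Set.union (PySem.Set.union (PySem.Set.add res x) r1) r2 := by
  have e1 : PySem.Set.union [x] r1 = [x] ++ r1 :=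
    PySem.Set.update_eq_append_of_disjoint _ _ h1 (by intro p hp; simp [hx1 p hp])
  have e2 : PySem.Set.union ([x] ++ r1) r2 = ([x] ++ r1) ++ r2 :=
    PySem.Set.update_eq_append_of_disjoint _ _ h2
      (by intro p hp; simp [hx2 p hp, h12 p hp])
  show PySem.Set.union res (PySem.Set.union (PySem.Set.union [x] r1) r2) = _
  rw [e1, e2]
  show PySem.Set.update res (x :: (r1 ++ r2)) = _
  rw [PySem.Set.update_cons, PySem.Set.update_append]
  rfl

def pvProc (w : List (List String)) : List (Int × Int) → PySem.Set (Int × Int) → PySem.Set (Int × Int) → PySem.Set (Int × Int) × PySem.Set (Int × Int)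
  | [], seen, res => (res, seen)
  | (a, b) :: st, seen, res =>
      let r := pvGoA w (pvM w seen + 1) a b seen
      pvProc w st r.2 (PySem.Set.union res r.1)

lemma pvSim (w : List (List String)) (hs : pvSafe w = true) :
    ∀ fB : Nat, ∀ st : List (Int × Int), ∀ seen res : PySem.Set (Int × Int),
      (∀ p ∈ st, pvInR w p.1 p.2) → st.length + 3 * pvM w seen < fB →
      pvLoopB w fB st seen res = pvProc w st seen res := by
  intro fB
  induction fB with
  | zero => intro st seen res _ h; omega
  | succ f ih =>
    rintro (_ | ⟨⟨a, b⟩, st⟩) seen res hst hf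
    · simp [pvLoopB, pvProc]
    · have hinR : pvInR w a b := hst (a, b) (.head _)
      have htail : ∀ p ∈ st, pvInR w p.1 p.2 := fun p hp => hst p (.tail _ hp)
      by_cases hmem : (a, b) ∈ seen
      · rw [show pvLoopB w (f+1) ((a,b)::st) seen res = pvLoopB w f st seen res from by
          simp [pvLoopB, hmem]]
        rw [ih st seen res htail (by simp at hf ⊢; omega)]
        have hgo : pvGoA w (pvM w seen + 1) a b seen = (PySem.Set.empty, seen) := by
          simp [pvGoA, hmem]
        show _ = pvProc w ((a,b)::st) seen res
        simp only [pvProc, hgo]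
        rfl
      · have hadd : PySem.Set.add seen (a, b) = seen ++ [(a, b)] :=
          PySem.Set.add_of_not_mem hmem
        have hdrop : pvM w (seen ++ [(a, b)]) < pvM w seen := by
          rw [← hadd]; exact pvM_add_lt w seen a b hinR hmem
        have hflen : st.length + 1 + 3 * pvM w seen < f + 1 := by simpa using hf
        by_cases hL : pvCell w a b = some "["
        · have hbox := pvBox_inside w a b "[" hs hinR hL (by simp [pvIsBox])
          have hstep : pvLoopB w (f+1) ((a,b)::st) seen res =
              pvLoopB w f ((a, b+1) :: (a-1, b) :: st) (seen ++ [(a, b)]) (PySem.Set.add res (a, b)) := by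
            simp [pvLoopB, hmem, hL]
          rw [hstep]
          rw [ih _ _ _ (by
            intro p hp
            simp only [List.mem_cons] at hp
            rcases hp with rfl | rfl | hp
            · exact hbox.2.1
            · exact hbox.1
            · exact htail p hp) (by simp; omega)]
          simp only [pvProc]
          have hq1 : pvGoA w (pvM w (seen ++ [(a, b)]) + 1) a (b+1) (seen ++ [(a, b)]) =
              pvGoA w (pvM w seen) a (b+1) (seen ++ [(a, b)]) :=
            pvGoA_fuel_irrel w hs _ _ _ _ _ hbox.2.1 (by omega) (by omega)
          rw [hq1]
          have hgrow1 : ∀ p, p ∈ seen ++ [(a, b)] →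
              p ∈ (pvGoA w (pvM w seen) a (b+1) (seen ++ [(a, b)])).2 :=
            (pvGoA_facts w (pvM w seen) a (b+1) (seen ++ [(a, b)])).1
          have hm1 : pvM w (pvGoA w (pvM w seen) a (b+1) (seen ++ [(a, b)])).2 ≤
              pvM w (seen ++ [(a, b)]) := pvM_mono w _ _ hgrow1
          have hq2 : pvGoA w (pvM w (pvGoA w (pvM w seen) a (b+1) (seen ++ [(a, b)])).2 + 1)
                (a-1) b (pvGoA w (pvM w seen) a (b+1) (seen ++ [(a, b)])).2 =
              pvGoA w (pvM w seen) (a-1) b (pvGoA w (pvM w seen) a (b+1) (seen ++ [(a, b)])).2 :=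
            pvGoA_fuel_irrel w hs _ _ _ _ _ hbox.1 (by omega) (by omega)
          rw [hq2]
          have hR : pvGoA w (pvM w seen + 1) a b seen =
              (PySem.Set.union (PySem.Set.union (PySem.Set.ofList [(a, b)])
                  (pvGoA w (pvM w seen) a (b+1) (seen ++ [(a, b)])).1)
                  (pvGoA w (pvM w seen) (a-1) b (pvGoA w (pvM w seen) a (b+1) (seen ++ [(a, b)])).2).1,
               (pvGoA w (pvM w seen) (a-1) b (pvGoA w (pvM w seen) a (b+1) (seen ++ [(a, b)])).2).2) := by
            simp [pvGoA, hmem, hL]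
          rw [hR]
          obtain ⟨g1, g2, g3⟩ := pvGoA_facts w (pvM w seen) a (b+1) (seen ++ [(a, b)])
          obtain ⟨k1, k2, k3⟩ := pvGoA_facts w (pvM w seen) (a-1) b
            (pvGoA w (pvM w seen) a (b+1) (seen ++ [(a, b)])).2
          have hshuffle := pvUnion_shuffle res
            (pvGoA w (pvM w seen) a (b+1) (seen ++ [(a, b)])).1
            (pvGoA w (pvM w seen) (a-1) b (pvGoA w (pvM w seen) a (b+1) (seen ++ [(a, b)])).2).1
            (a, b) g3 k3
            (fun p hp => by
              have := (g2 p hp).1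
              intro h; exact this (by rw [h]; simp)
            )
            (fun p hp => by
              have hnot := (k2 p hp).1
              intro h
              exact hnot (by rw [h]; exact g1 _ (by simp))
            )
            (fun p hp => (k2 p hp).1 ∘ (g2 p · |>.2))
          rw [← hshuffle]
        · by_cases hRc : pvCell w a b = some "]"
          · have hbox := pvBox_inside w a b "]" hs hinR hRc (by simp [pvIsBox])
            have hstep : pvLoopB w (f+1) ((a,b)::st) seen res =
                pvLoopB w f ((a, b-1) :: (a-1, b) :: st) (seen ++ [(a, b)]) (PySem.Set.add res (a, b)) := by
              simp [pvLoopB, hmem, hRc]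
            rw [hstep]
            rw [ih _ _ _ (by
              intro p hp
              simp only [List.mem_cons] at hp
              rcases hp with rfl | rfl | hp
              · exact hbox.2.2
              · exact hbox.1
              · exact htail p hp) (by simp; omega)]
            simp only [pvProc]
            have hq1 : pvGoA w (pvM w (seen ++ [(a, b)]) + 1) a (b-1) (seen ++ [(a, b)]) =
                pvGoA w (pvM w seen) a (b-1) (seen ++ [(a, b)]) :=
              pvGoA_fuel_irrel w hs _ _ _ _ _ hbox.2.2 (by omega) (by omega)
            rw [hq1]
            have hgrow1 : ∀ p, p ∈ seen ++ [(a, b)] →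
                p ∈ (pvGoA w (pvM w seen) a (b-1) (seen ++ [(a, b)])).2 :=
              (pvGoA_facts w (pvM w seen) a (b-1) (seen ++ [(a, b)])).1
            have hm1 : pvM w (pvGoA w (pvM w seen) a (b-1) (seen ++ [(a, b)])).2 ≤
                pvM w (seen ++ [(a, b)]) := pvM_mono w _ _ hgrow1
            have hq2 : pvGoA w (pvM w (pvGoA w (pvM w seen) a (b-1) (seen ++ [(a, b)])).2 + 1)
                  (a-1) b (pvGoA w (pvM w seen) a (b-1) (seen ++ [(a, b)])).2 =
                pvGoA w (pvM w seen) (a-1) b (pvGoA w (pvM w seen) a (b-1) (seen ++ [(a, b)])).2 :=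
              pvGoA_fuel_irrel w hs _ _ _ _ _ hbox.1 (by omega) (by omega)
            rw [hq2]
            have hR : pvGoA w (pvM w seen + 1) a b seen =
                (PySem.Set.union (PySem.Set.union (PySem.Set.ofList [(a, b)])
                    (pvGoA w (pvM w seen) a (b-1) (seen ++ [(a, b)])).1)
                    (pvGoA w (pvM w seen) (a-1) b (pvGoA w (pvM w seen) a (b-1) (seen ++ [(a, b)])).2).1,
                 (pvGoA w (pvM w seen) (a-1) b (pvGoA w (pvM w seen) a (b-1) (seen ++ [(a, b)])).2).2) := by
              simp [pvGoA, hmem, hRc]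
            rw [hR]
            obtain ⟨g1, g2, g3⟩ := pvGoA_facts w (pvM w seen) a (b-1) (seen ++ [(a, b)])
            obtain ⟨k1, k2, k3⟩ := pvGoA_facts w (pvM w seen) (a-1) b
              (pvGoA w (pvM w seen) a (b-1) (seen ++ [(a, b)])).2
            have hshuffle := pvUnion_shuffle res
              (pvGoA w (pvM w seen) a (b-1) (seen ++ [(a, b)])).1
              (pvGoA w (pvM w seen) (a-1) b (pvGoA w (pvM w seen) a (b-1) (seen ++ [(a, b)])).2).1
              (a, b) g3 k3
              (fun p hp => by
                have := (g2 p hp).1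
                intro h; exact this (by rw [h]; simp)
              )
              (fun p hp => by
                have hnot := (k2 p hp).1
                intro h
                exact hnot (by rw [h]; exact g1 _ (by simp))
              )
              (fun p hp => (k2 p hp).1 ∘ (g2 p · |>.2))
            rw [← hshuffle]
          · have hstep : pvLoopB w (f+1) ((a,b)::st) seen res =
                pvLoopB w f st (seen ++ [(a, b)]) res := by
              simp [pvLoopB, hmem, hL, hRc]
            rw [hstep]
            rw [ih st _ res htail (by omega)]
            have hgo : pvGoA w (pvM w seen + 1) a b seen = (PySem.Set.empty, seen ++ [(a, b)]) := by
              simp [pvGoA, hmem, hL, hRc]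
            show _ = pvProc w ((a,b)::st) seen res
            simp only [pvProc, hgo]
            rfl

lemma pvLoopB_nil (w : List (List String)) (f : Nat) (seen res : PySem.Set (Int × Int)) :
    pvLoopB w f [] seen res = (res, seen) := by
  cases f <;> simp [pvLoopB]

lemma pvLoopB_skip (w : List (List String)) (f : Nat) (a b : Int) (st : List (Int × Int))
    (seen res : PySem.Set (Int × Int)) (h : (a, b) ∈ seen) :
    pvLoopB w (f+1) ((a, b) :: st) seen res = pvLoopB w f st seen res := by
  simp [pvLoopB, h]

lemma pvLoopB_nonbox (w : List (List String)) (f : Nat) (a b : Int) (st : List (Int × Int))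
    (seen res : PySem.Set (Int × Int)) (h : (a, b) ∉ seen)
    (hL : pvCell w a b ≠ some "[") (hR : pvCell w a b ≠ some "]") :
    pvLoopB w (f+1) ((a, b) :: st) seen res = pvLoopB w f st (PySem.Set.add seen (a, b)) res := by
  simp [pvLoopB, h, hL, hR]

-- ===== VERDICT (by name: the statement is the Claim_ definition above) =====
theorem get_all_pushes_above_spec : Claim_equal_get_all_pushes_above := by
  unfold Claim_equal_get_all_pushes_above
  intro i j w seen _hdom hpre
  unfold Spec_get_all_pushes_above get_all_pushes_above get_all_pushes_above_alt
  rw [show pvFuelA w = (w.map List.length).sum + 1 from rfl,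
      show pvFuelB w = (3 * (w.map List.length).sum + 1) + 1 from rfl]
  by_cases hm : (i, j) ∈ PySem.Set.ofList seen
  · rw [show pvGoA w ((w.map List.length).sum + 1) i j (PySem.Set.ofList seen) =
        (PySem.Set.empty, PySem.Set.ofList seen) from by simp [pvGoA, hm]]
    rw [pvLoopB_skip w _ i j [] _ _ hm, pvLoopB_nil]
  · rcases hpre with hmem | hcell | ⟨hs, h1, h2, h3, h4⟩
    · exact absurd ((PySem.Set.mem_ofList seen (i, j)).mpr hmem) hm
    · obtain ⟨s, hcs, hnb⟩ : ∃ s, pvCell w i j = some s ∧ pvIsBox s = false := by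
        cases hc : pvCell w i j with
        | none => rw [hc] at hcell; simp at hcell
        | some s => rw [hc] at hcell; simp at hcell; exact ⟨s, rfl, hcell⟩
      have hL : pvCell w i j ≠ some "[" := by
        rw [hcs]; intro h; injection h with h; rw [h] at hnb; simp [pvIsBox] at hnb
      have hR : pvCell w i j ≠ some "]" := by
        rw [hcs]; intro h; injection h with h; rw [h] at hnb; simp [pvIsBox] at hnb
      rw [show pvGoA w ((w.map List.length).sum + 1) i j (PySem.Set.ofList seen) =
          (PySem.Set.empty, PySem.Set.add (PySem.Set.ofList seen) (i, j)) from by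
        simp [pvGoA, hm, hL, hR]]
      rw [pvLoopB_nonbox w _ i j [] _ _ hm hL hR, pvLoopB_nil]
    · have hinR : pvInR w i j := ⟨h1, by simpa using h2, h3, by simpa using h4⟩
      have hMle := pvM_le_sum w hs (PySem.Set.ofList seen)
      rw [pvSim w hs _ [(i, j)] (PySem.Set.ofList seen) PySem.Set.empty
            (by intro p hp; simp at hp; rw [hp]; exact hinR) (by simp; omega)]
      simp only [pvProc]
      have hA : pvGoA w ((w.map List.length).sum + 1) i j (PySem.Set.ofList seen) =
          pvGoA w (pvM w (PySem.Set.ofList seen) + 1) i j (PySem.Set.ofList seen) :=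
        pvGoA_fuel_irrel w hs _ _ _ _ _ hinR (by omega) (by omega)
      rw [hA]
      obtain ⟨-, -, hnd⟩ := pvGoA_facts w (pvM w (PySem.Set.ofList seen) + 1) i j (PySem.Set.ofList seen)
      exact (PySem.Set.ofList_eq_self_of_nodup _ hnd).symm
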